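-- pv_equiv track=rewrite | github.com/pypi-data/pypi-mirror-368 | packages/pacificpy/pacificpy-0.0.1-py3-none-any.whl/routing/decorators.py | _infer_methods_from_name
-- ===== SOURCE A (Python) =====
-- from typing import Any, Callable, Dict, List, Optional, Union
--
-- def _infer_methods_from_name(func_name: str) -> List[str]:
--     """
--     Infer HTTP methods from function name prefix.
--
--     Args:
--         func_name: Name of the function
--
--     Returns:
--         List of HTTP methods
--     """
--     method_map = {
--         'get_': 'GET',
--         'post_': 'POST',
--         'put_': 'PUT',
--         'delete_': 'DELETE',
--         'patch_': 'PATCH',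
--         'head_': 'HEAD',
--         'options_': 'OPTIONS'
--     }
--
--     for prefix, method in method_map.items():
--         if func_name.startswith(prefix):
--             return [method]
--
--     # Default to GET if no prefix matches
--     return ['GET']
-- ===== SOURCE B (Python) =====
-- def _infer_methods_from_name(func_name: str):
--     """Infer HTTP methods from function name prefix (parse-then-lookup)."""
--     METHODS = {
--         'get': 'GET',
--         'post': 'POST',
--         'put': 'PUT',
--         'delete': 'DELETE',
--         'patch': 'PATCH',
--         'head': 'HEAD',
--         'options': 'OPTIONS',
--     }
--     head, sep, _tail = func_name.partition('_')
--     if sep: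
--         method = METHODS.get(head)
--         if method is not None:
--             return [method]
--     return ['GET']
-- ===== Notes on version B (the rewrite author's own statement) =====
-- stated objective: idiomatic
-- what changed: Replaces the ordered scan of seven startswith prefix tests by a single parse (partition on the first underscore) followed by one hash lookup of the bare token.
import Mathlib
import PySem

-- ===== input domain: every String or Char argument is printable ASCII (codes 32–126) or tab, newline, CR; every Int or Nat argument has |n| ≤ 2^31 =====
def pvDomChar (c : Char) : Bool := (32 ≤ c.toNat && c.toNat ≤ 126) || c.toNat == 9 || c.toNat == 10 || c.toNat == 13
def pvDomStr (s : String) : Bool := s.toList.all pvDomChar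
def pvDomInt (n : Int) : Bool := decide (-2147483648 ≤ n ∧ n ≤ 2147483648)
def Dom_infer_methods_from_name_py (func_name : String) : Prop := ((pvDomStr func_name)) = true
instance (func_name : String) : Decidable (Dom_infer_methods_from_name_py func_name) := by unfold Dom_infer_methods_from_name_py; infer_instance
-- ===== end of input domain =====

-- B replaces A's ordered first-match scan of seven "tok_" startswith tests by one parse of the
-- token before the first underscore plus a single dict lookup (idiomatic; same return value).


-- ===== PORT A =====
-- the for-loop over method_map.items(): first prefix match wins, default ['GET']
def pvLoopA (func_name : String) : List (String × String) → List String
  | [] => ["GET"]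
  | (pre, meth) :: rest =>
    if PySem.Str.startswith func_name pre then [meth] else pvLoopA func_name rest

def infer_methods_from_name_py (func_name : String) : List String :=
  pvLoopA func_name
    [("get_", "GET"), ("post_", "POST"), ("put_", "PUT"), ("delete_", "DELETE"),
     ("patch_", "PATCH"), ("head_", "HEAD"), ("options_", "OPTIONS")]

-- ===== PORT B =====
-- func_name.partition('_') ported by hand (no PySem partition): head = chars before the first
-- '_', and the separator is truthy exactly when '_' occurs in func_name; exact on all strings.
def infer_methods_from_name_py_alt (func_name : String) : List String :=
  let methods : PySem.Dict String String :=
    ⟨[("get", "GET"), ("post", "POST"), ("put", "PUT"), ("delete", "DELETE"),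
      ("patch", "PATCH"), ("head", "HEAD"), ("options", "OPTIONS")]⟩
  let cs := func_name.toList
  let head := cs.takeWhile (fun x => decide (x ≠ '_'))
  if '_' ∈ cs then
    match PySem.Dict.get? methods (String.ofList head) with
    | some m => [m]
    | none => ["GET"]
  else ["GET"]

-- ===== PRECONDITION & SPEC =====
def Spec_infer_methods_from_name_py (func_name : String) (out : List String) : Prop := out = infer_methods_from_name_py_alt func_name
instance (func_name : String) (out : List String) : Decidable (Spec_infer_methods_from_name_py func_name out) := by unfold Spec_infer_methods_from_name_py; infer_instance

-- ===== CLAIM (what is proved, stated in full; the proofs are below) =====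
def Claim_equal_infer_methods_from_name_py : Prop := ∀ (func_name : String), Dom_infer_methods_from_name_py func_name → Spec_infer_methods_from_name_py func_name (infer_methods_from_name_py func_name)

-- ===== LEMMAS AND PROOFS =====

lemma prefix_underscore (tok cs : List Char) (ht : '_' ∉ tok) :
    (tok ++ ['_']) <+: cs ↔ ('_' ∈ cs ∧ cs.takeWhile (fun x => decide (x ≠ '_')) = tok) := by
  induction tok generalizing cs with
  | nil =>
    cases cs with
    | nil => simp
    | cons b cs' =>
      by_cases hb : b = '_'
      · subst hb; simp
      · simp [List.cons_prefix_cons, hb, Ne.symm hb]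
  | cons a t ih =>
    have ha : a ≠ '_' := fun h => ht (h ▸ List.mem_cons_self)
    have ht' : '_' ∉ t := fun h => ht (List.mem_cons_of_mem _ h)
    cases cs with
    | nil => simp
    | cons b cs' =>
      rw [List.cons_append, List.cons_prefix_cons, ih cs' ht']
      by_cases hb : b = a
      · subst hb
        simp [ha, List.mem_cons, Ne.symm ha]
      · constructor
        · rintro ⟨h, -⟩; exact absurd h.symm hb
        · rintro ⟨-, h2⟩
          by_cases hbu : b = '_'
          · simp [hbu] at h2
          · simp [hbu] at h2
            exact absurd h2.1 hb

lemma sw (s p : String) (tok : List Char) (hp : p.toList = tok ++ ['_']) (ht : '_' ∉ tok) :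
    (PySem.Str.startswith s p = true) ↔
      ('_' ∈ s.toList ∧ s.toList.takeWhile (fun x => decide (x ≠ '_')) = tok) := by
  rw [PySem.Str.startswith_eq, PySem.Chars.startswith_iff, hp]
  exact prefix_underscore tok s.toList ht

-- ===== VERDICT (by name: the statement is the Claim_ definition above) =====
theorem infer_methods_from_name_py_spec : Claim_equal_infer_methods_from_name_py := by
  intro s _
  unfold Spec_infer_methods_from_name_py infer_methods_from_name_py infer_methods_from_name_py_alt
  simp only [pvLoopA]
  by_cases hmem : '_' ∈ s.toList
  case neg =>
    rw [if_neg ((sw s "get_" "get".toList rfl (by decide)).not.mpr (fun h => hmem h.1)),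
        if_neg ((sw s "post_" "post".toList rfl (by decide)).not.mpr (fun h => hmem h.1)),
        if_neg ((sw s "put_" "put".toList rfl (by decide)).not.mpr (fun h => hmem h.1)),
        if_neg ((sw s "delete_" "delete".toList rfl (by decide)).not.mpr (fun h => hmem h.1)),
        if_neg ((sw s "patch_" "patch".toList rfl (by decide)).not.mpr (fun h => hmem h.1)),
        if_neg ((sw s "head_" "head".toList rfl (by decide)).not.mpr (fun h => hmem h.1)),
        if_neg ((sw s "options_" "options".toList rfl (by decide)).not.mpr (fun h => hmem h.1)),
        if_neg hmem]
  case pos =>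
  have key : ∀ (t : String), s.toList.takeWhile (fun x => decide (x ≠ '_')) ≠ t.toList →
      (t == String.ofList (s.toList.takeWhile (fun x => decide (x ≠ '_')))) = false := by
    intro t h
    rw [beq_eq_false_iff_ne]
    intro he
    exact h (by rw [he, String.toList_ofList])
  rw [if_pos hmem]
  by_cases h1 : s.toList.takeWhile (fun x => decide (x ≠ '_')) = "get".toList
  case pos =>
    rw [if_pos ((sw s "get_" "get".toList rfl (by decide)).mpr ⟨hmem, h1⟩), h1]; rfl
  case neg =>
  rw [if_neg ((sw s "get_" "get".toList rfl (by decide)).not.mpr (fun h => h1 h.2))]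
  by_cases h2 : s.toList.takeWhile (fun x => decide (x ≠ '_')) = "post".toList
  case pos =>
    rw [if_pos ((sw s "post_" "post".toList rfl (by decide)).mpr ⟨hmem, h2⟩), h2]; rfl
  case neg =>
  rw [if_neg ((sw s "post_" "post".toList rfl (by decide)).not.mpr (fun h => h2 h.2))]
  by_cases h3 : s.toList.takeWhile (fun x => decide (x ≠ '_')) = "put".toList
  case pos =>
    rw [if_pos ((sw s "put_" "put".toList rfl (by decide)).mpr ⟨hmem, h3⟩), h3]; rfl
  case neg =>
  rw [if_neg ((sw s "put_" "put".toList rfl (by decide)).not.mpr (fun h => h3 h.2))]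
  by_cases h4 : s.toList.takeWhile (fun x => decide (x ≠ '_')) = "delete".toList
  case pos =>
    rw [if_pos ((sw s "delete_" "delete".toList rfl (by decide)).mpr ⟨hmem, h4⟩), h4]; rfl
  case neg =>
  rw [if_neg ((sw s "delete_" "delete".toList rfl (by decide)).not.mpr (fun h => h4 h.2))]
  by_cases h5 : s.toList.takeWhile (fun x => decide (x ≠ '_')) = "patch".toList
  case pos =>
    rw [if_pos ((sw s "patch_" "patch".toList rfl (by decide)).mpr ⟨hmem, h5⟩), h5]; rfl
  case neg =>
  rw [if_neg ((sw s "patch_" "patch".toList rfl (by decide)).not.mpr (fun h => h5 h.2))]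
  by_cases h6 : s.toList.takeWhile (fun x => decide (x ≠ '_')) = "head".toList
  case pos =>
    rw [if_pos ((sw s "head_" "head".toList rfl (by decide)).mpr ⟨hmem, h6⟩), h6]; rfl
  case neg =>
  rw [if_neg ((sw s "head_" "head".toList rfl (by decide)).not.mpr (fun h => h6 h.2))]
  by_cases h7 : s.toList.takeWhile (fun x => decide (x ≠ '_')) = "options".toList
  case pos =>
    rw [if_pos ((sw s "options_" "options".toList rfl (by decide)).mpr ⟨hmem, h7⟩), h7]; rfl
  case neg =>
  rw [if_neg ((sw s "options_" "options".toList rfl (by decide)).not.mpr (fun h => h7 h.2))]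
  simp only [PySem.Dict.get?]
  rw [List.find?_cons_of_neg (by simpa using key "get" h1), List.find?_cons_of_neg (by simpa using key "post" h2), List.find?_cons_of_neg (by simpa using key "put" h3), List.find?_cons_of_neg (by simpa using key "delete" h4), List.find?_cons_of_neg (by simpa using key "patch" h5), List.find?_cons_of_neg (by simpa using key "head" h6), List.find?_cons_of_neg (by simpa using key "options" h7)]
  rfl
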